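-- pv_equiv track=rewrite | github.com/openyeoreum/yaas-legacy | backend/b2_Solution/b24_DataFrame/b242_Script/b2423_BodySummaryUpdate.py | BodySummaryInputMemory
-- ===== SOURCE A (Python) =====
-- def BodySummaryInputMemory(inputMemoryDics, MemoryLength):
--
--     inputMemoryDic = []
--     continueCount = 0
--     for entry in reversed(inputMemoryDics):
--         if continueCount == MemoryLength + 1:
--             break
--         else:
--             if "Continue" in entry:
--                 continueCount += 1
--                 inputMemoryDic.append(entry)
--             else:
--                 inputMemoryDic.append(entry)
--     inputMemoryDic = list(reversed(inputMemoryDic))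
--     inputMemory = str(inputMemoryDic)
--
--     return inputMemory
-- ===== SOURCE B (Python) =====
-- def BodySummaryInputMemory(inputMemoryDics, MemoryLength):
--     target = MemoryLength + 1
--     marks = [i for i, entry in enumerate(inputMemoryDics) if "Continue" in entry]
--     if 0 < target <= len(marks):
--         start = marks[len(marks) - target]
--     elif target == 0:
--         start = len(inputMemoryDics)
--     else:
--         start = 0
--     return str(inputMemoryDics[start:])
-- ===== Notes on version B (the rewrite author's own statement) =====
-- stated objective: alternative
-- what changed: Instead of A's reverse iteration that accumulates entries until the Continue budget is exhausted and then re-reverses the accumulator, B enumerates the list once forward collecting the indices of entries containing "Continue", picks the cut point by direct index arithmetic on that list, and returns str() of a single slice of the original list.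
import Mathlib
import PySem

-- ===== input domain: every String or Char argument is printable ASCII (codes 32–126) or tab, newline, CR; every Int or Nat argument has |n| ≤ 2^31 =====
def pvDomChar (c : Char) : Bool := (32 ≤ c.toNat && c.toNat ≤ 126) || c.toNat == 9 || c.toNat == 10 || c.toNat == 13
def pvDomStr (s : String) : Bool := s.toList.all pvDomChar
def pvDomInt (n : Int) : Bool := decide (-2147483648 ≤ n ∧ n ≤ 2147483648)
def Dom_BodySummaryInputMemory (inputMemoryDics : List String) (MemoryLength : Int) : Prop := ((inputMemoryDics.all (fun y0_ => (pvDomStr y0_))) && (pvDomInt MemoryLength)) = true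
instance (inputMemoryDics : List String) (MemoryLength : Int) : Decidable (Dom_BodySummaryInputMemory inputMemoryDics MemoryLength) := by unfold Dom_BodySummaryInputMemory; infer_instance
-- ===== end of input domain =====

-- B replaces A's reverse accumulate-and-re-reverse loop by a forward scan collecting the
-- "Continue" positions and one slice computed by index arithmetic (objective: alternative).


-- shared helper: '"Continue" in entry' (both Pythons use the same membership test)
def hasContinue (s : String) : Bool := PySem.Str.isIn "Continue" s

-- shared helper: Python's str(list_of_str) = repr; exact on Dom's character set
-- (printable ASCII plus tab/newline/CR: repr escapes \, the quote, \t, \n, \r and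
-- uses double quotes iff the string contains ' but no ")
def pyReprChars (cs : List Char) : List Char :=
  let q : Char := if cs.contains '\'' && !cs.contains '"' then '"' else '\''
  q :: (cs.flatMap (fun c =>
    if c = '\\' then ['\\', '\\']
    else if c = q then ['\\', q]
    else if c = '\t' then ['\\', 't']
    else if c = '\n' then ['\\', 'n']
    else if c = '\r' then ['\\', 'r']
    else [c])) ++ [q]

def pyStrListRepr (xs : List String) : String :=
  String.ofList ('[' :: PySem.Chars.join [',', ' '] (xs.map (fun s => pyReprChars s.toList)) ++ [']'])

-- ===== PORT A =====
-- the 'for entry in reversed(...)' loop with its break; appends in scan order (= cons-built list)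
def loopA : List String → Int → Int → List String
  | [], _, _ => []
  | e :: rest, continueCount, ml =>
    if continueCount = ml + 1 then []
    else if hasContinue e then e :: loopA rest (continueCount + 1) ml
    else e :: loopA rest continueCount ml

def BodySummaryInputMemory (inputMemoryDics : List String) (MemoryLength : Int) : String :=
  pyStrListRepr (loopA inputMemoryDics.reverse 0 MemoryLength).reverse

-- ===== PORT B =====
-- the comprehension '[i for i, entry in enumerate(xs) if "Continue" in entry]'
def marksOf : List String → Nat → List Nat
  | [], _ => []
  | e :: rest, i => if hasContinue e then i :: marksOf rest (i + 1) else marksOf rest (i + 1)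

def BodySummaryInputMemory_alt (inputMemoryDics : List String) (MemoryLength : Int) : String :=
  let target : Int := MemoryLength + 1
  let marks : List Nat := marksOf inputMemoryDics 0
  let start : Nat :=
    if 0 < target ∧ target ≤ (marks.length : Int) then
      -- marks[len(marks) - target]: the branch guarantees the index is in range, so getD is exact
      marks.getD (marks.length - target.toNat) 0
    else if target = 0 then inputMemoryDics.length
    else 0
  -- xs[start:] with 0 ≤ start is exactly List.drop
  pyStrListRepr (inputMemoryDics.drop start)

-- ===== PRECONDITION & SPEC =====
def Spec_BodySummaryInputMemory (inputMemoryDics : List String) (MemoryLength : Int) (out : String) : Prop := out = BodySummaryInputMemory_alt inputMemoryDics MemoryLength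
instance (inputMemoryDics : List String) (MemoryLength : Int) (out : String) : Decidable (Spec_BodySummaryInputMemory inputMemoryDics MemoryLength out) := by unfold Spec_BodySummaryInputMemory; infer_instance

-- ===== CLAIM (what is proved, stated in full; the proofs are below) =====
def Claim_equal_BodySummaryInputMemory : Prop := ∀ (inputMemoryDics : List String) (MemoryLength : Int), Dom_BodySummaryInputMemory inputMemoryDics MemoryLength → Spec_BodySummaryInputMemory inputMemoryDics MemoryLength (BodySummaryInputMemory inputMemoryDics MemoryLength)

-- ===== LEMMAS AND PROOFS =====

-- how many leading elements of ys A's loop keeps, given the remaining budget d = ml + 1 - cnt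
def keep : List String → Int → Nat
  | [], _ => 0
  | e :: rest, d => if d = 0 then 0 else 1 + keep rest (d - (if hasContinue e then 1 else 0))

theorem loopA_eq_take_keep (ys : List String) : ∀ (c ml : Int),
    loopA ys c ml = ys.take (keep ys (ml + 1 - c)) := by
  induction ys with
  | nil => intro c ml; rfl
  | cons e rest ih =>
    intro c ml
    by_cases hc : c = ml + 1
    · simp [loopA, keep, hc]
    · have hd : ¬ (ml + 1 - c = 0) := by omega
      by_cases hm : hasContinue e
      · have h2 : ml + 1 - (c + 1) = ml + 1 - c - 1 := by omega
        simp only [loopA, keep, if_neg (by omega : ¬ c = ml + 1), if_pos hm, if_neg hd, ih, h2]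
        rw [Nat.add_comm, List.take_succ_cons]
      · simp only [loopA, keep, if_neg (by omega : ¬ c = ml + 1), if_neg hm, if_neg hd, ih,
          sub_zero]
        rw [Nat.add_comm, List.take_succ_cons]

theorem marksOf_append_singleton (zs : List String) : ∀ (i : Nat) (y : String),
    marksOf (zs ++ [y]) i = marksOf zs i ++ (if hasContinue y then [i + zs.length] else []) := by
  induction zs with
  | nil =>
    intro i y
    by_cases h : hasContinue y <;> simp [marksOf, h]
  | cons e rest ih =>
    intro i y
    have h' : i + 1 + rest.length = i + (e :: rest).length := by simp; omega
    by_cases h : hasContinue e <;> simp [marksOf, h, ih, h']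

theorem marksOf_lt (zs : List String) : ∀ (i : Nat) (x : Nat), x ∈ marksOf zs i → x < i + zs.length := by
  induction zs with
  | nil => intro i x hx; simp [marksOf] at hx
  | cons e rest ih =>
    intro i x hx
    by_cases h : hasContinue e <;> simp only [marksOf, h, if_pos, if_neg, List.mem_cons,
      Bool.not_eq_true] at hx
    · rcases hx with rfl | hx
      · simp
      · have := ih (i + 1) x hx; simp only [List.length_cons]; omega
    · have := ih (i + 1) x hx; simp only [List.length_cons]; omega

theorem marks_getD_lt (zs : List String) (k : Nat) (hk : k < (marksOf zs 0).length) :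
    (marksOf zs 0).getD k 0 < zs.length := by
  have hmem : (marksOf zs 0).getD k 0 ∈ marksOf zs 0 := by
    rw [List.getD_eq_getElem _ _ hk]; exact List.getElem_mem _
  have := marksOf_lt zs 0 _ hmem
  omega

-- the central characterisation of keep on the reversed list, in terms of B's marks
theorem keep_reverse_eq (xs : List String) : ∀ d : Int,
    keep xs.reverse d =
      if d < 0 then xs.length
      else if d = 0 then 0
      else if d ≤ ((marksOf xs 0).length : Int) then
        xs.length - (marksOf xs 0).getD ((marksOf xs 0).length - d.toNat) 0
      else xs.length := by
  induction xs using List.reverseRecOn with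
  | nil =>
    intro d
    simp only [List.reverse_nil, List.length_nil, marksOf, List.getD_nil]
    show keep [] d = _
    simp only [keep]
    split_ifs <;> rfl
  | append_singleton zs y ih =>
    intro d
    rw [List.reverse_append, marksOf_append_singleton]
    simp only [List.reverse_singleton, List.singleton_append, Nat.zero_add]
    have hkeep : keep (y :: zs.reverse) d
        = if d = 0 then 0 else 1 + keep zs.reverse (d - (if hasContinue y then 1 else 0)) := rfl
    rw [hkeep]
    have hlen : (zs ++ [y]).length = zs.length + 1 := by simp
    rw [hlen]
    by_cases hd0 : d = 0
    · simp [hd0]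
    · rw [if_neg hd0, if_neg hd0]
      by_cases hy : hasContinue y
      · rw [if_pos hy, if_pos hy, ih]
        have hmlen : (marksOf zs 0 ++ [zs.length]).length = (marksOf zs 0).length + 1 := by simp
        rw [hmlen]
        by_cases hdneg : d < 0
        · rw [if_pos (by omega : d - 1 < 0), if_pos hdneg]
          omega
        · rw [if_neg (by omega : ¬ d - 1 < 0), if_neg hdneg]
          by_cases hd1 : d = 1
          · subst hd1
            rw [if_pos (by omega : (1:Int) - 1 = 0),
              if_pos (by push_cast; omega : (1:Int) ≤ (((marksOf zs 0).length + 1 : Nat) : Int)),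
              (by omega : (marksOf zs 0).length + 1 - (1:Int).toNat = (marksOf zs 0).length),
              List.getD_append_right _ _ _ _ (le_refl _)]
            simp
          · rw [if_neg (by omega : ¬ d - 1 = 0)]
            by_cases hdm : d - 1 ≤ ((marksOf zs 0).length : Int)
            · rw [if_pos hdm,
                if_pos (by push_cast; omega : d ≤ (((marksOf zs 0).length + 1 : Nat) : Int))]
              have hidx2 : (marksOf zs 0).length - (d - 1).toNat < (marksOf zs 0).length := by
                omega
              rw [(by omega : (marksOf zs 0).length + 1 - d.toNat
                    = (marksOf zs 0).length - (d - 1).toNat),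
                List.getD_append _ _ _ _ hidx2]
              have hv := marks_getD_lt zs _ hidx2
              omega
            · rw [if_neg hdm,
                if_neg (by push_cast; omega : ¬ d ≤ (((marksOf zs 0).length + 1 : Nat) : Int))]
              omega
      · rw [if_neg hy, if_neg hy, List.append_nil, sub_zero, ih]
        by_cases hdneg : d < 0
        · rw [if_pos hdneg, if_pos hdneg]
          omega
        · rw [if_neg hdneg, if_neg hdneg, if_neg hd0]
          by_cases hdm : d ≤ ((marksOf zs 0).length : Int)
          · rw [if_pos hdm, if_pos hdm]
            have hidx2 : (marksOf zs 0).length - d.toNat < (marksOf zs 0).length := by omega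
            have hv := marks_getD_lt zs _ hidx2
            omega
          · rw [if_neg hdm, if_neg hdm]
            omega

theorem lists_agree (xs : List String) (ml : Int) :
    (loopA xs.reverse 0 ml).reverse =
      xs.drop
        (if 0 < ml + 1 ∧ ml + 1 ≤ ((marksOf xs 0).length : Int) then
           (marksOf xs 0).getD ((marksOf xs 0).length - (ml + 1).toNat) 0
         else if ml + 1 = 0 then xs.length
         else 0) := by
  rw [loopA_eq_take_keep]
  have hsub : ml + 1 - 0 = ml + 1 := by omega
  rw [hsub, List.take_reverse, List.reverse_reverse]
  congr 1
  rw [keep_reverse_eq]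
  by_cases h1 : ml + 1 < 0
  · rw [if_pos h1, if_neg (by omega : ¬ (0 < ml + 1 ∧ ml + 1 ≤ ((marksOf xs 0).length : Int))),
      if_neg (by omega : ¬ ml + 1 = 0)]
    omega
  · by_cases h2 : ml + 1 = 0
    · simp [h2]
    · by_cases h3 : ml + 1 ≤ ((marksOf xs 0).length : Int)
      · rw [if_neg h1, if_neg h2, if_pos h3, if_pos ⟨by omega, h3⟩]
        have hidx2 : (marksOf xs 0).length - (ml + 1).toNat < (marksOf xs 0).length := by omega
        have hv := marks_getD_lt xs _ hidx2
        omega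
      · rw [if_neg h1, if_neg h2, if_neg h3,
          if_neg (by omega : ¬ (0 < ml + 1 ∧ ml + 1 ≤ ((marksOf xs 0).length : Int))),
          if_neg h2]
        omega

-- ===== VERDICT (by name: the statement is the Claim_ definition above) =====
theorem BodySummaryInputMemory_spec : Claim_equal_BodySummaryInputMemory := by
  intro xs ml _
  unfold Spec_BodySummaryInputMemory BodySummaryInputMemory BodySummaryInputMemory_alt
  rw [lists_agree]
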